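-- pv_equiv track=rewrite | github.com/ahmed-sidik/public-codes | comb.py | multisets
-- ===== SOURCE A (Python) =====
-- def multisets(elements, N, K):
--     if K == 0 or N == 0:
--         return [[]]
--     elements = elements[:N]
--     generated = []
--     for i in range(N):
--         rest = elements[i:]
--         for m in multisets(rest, len(rest), K-1):
--             generated.append([elements[i]] + m)
--     return generated
-- ===== SOURCE B (Python) =====
-- def multisets(elements, N, K):
--     if K == 0 or N == 0:
--         return [[]]
--     acc = [(0, [])]
--     for _ in range(K):
--         if not acc:
--             break
--         acc = [(j, part + [elements[j]]) for (i, part) in acc for j in range(i, N)]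
--     return [part for (_, part) in acc]
-- ===== Notes on version B (the rewrite author's own statement) =====
-- stated objective: alternative
-- what changed: A enumerates multisets by recursing on suffixes (K-deep recursion, slicing a fresh rest list at every level); B is non-recursive: it keeps a flat list of (last-index, partial) pairs and expands it K times layer by layer, producing the same lexicographic order.
-- outside the precondition, e.g. on multisets([], -1, -1): A returns [], B returns [[]]; on multisets([1, 2], 5, 1): A raises IndexError, B raises IndexError
import Mathlib
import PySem

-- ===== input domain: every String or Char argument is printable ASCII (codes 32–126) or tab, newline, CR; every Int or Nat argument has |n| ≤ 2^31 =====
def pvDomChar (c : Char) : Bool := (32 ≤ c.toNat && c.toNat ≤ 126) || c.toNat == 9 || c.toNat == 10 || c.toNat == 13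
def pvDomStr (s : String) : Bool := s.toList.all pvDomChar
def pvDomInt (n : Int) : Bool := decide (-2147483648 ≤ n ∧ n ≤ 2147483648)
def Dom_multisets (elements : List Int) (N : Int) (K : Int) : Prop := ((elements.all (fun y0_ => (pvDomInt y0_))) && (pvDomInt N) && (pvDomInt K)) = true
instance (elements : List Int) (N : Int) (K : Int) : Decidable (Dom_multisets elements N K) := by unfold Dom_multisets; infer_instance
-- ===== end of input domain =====

-- B replaces A's suffix recursion by an iterative layer-by-layer expansion of (last-index, partial) pairs (different decomposition; objective: alternative).


-- ===== PORT A =====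
-- recursion depth is K, so the port recurses on K.toNat; K < 0 with N ≠ 0 (where Python recurses forever) is outside Pre_
def multisetsCore : Nat → List Int → Int → List (List Int)
  | 0, _, _ => [[]]                                         -- 'if K == 0 ... : return [[]]'
  | Nat.succ k, elements, N =>
    if N = 0 then [[]]                                      -- '... or N == 0: return [[]]'
    else
      let el := PySem.List.slice elements none (some N)     -- elements = elements[:N]
      (PySem.List.pyRange 0 N 1).foldl (fun generated i =>  -- for i in range(N):
        let rest := PySem.List.slice el (some i) none       --   rest = elements[i:]
        (multisetsCore k rest (rest.length : Int)).foldl    --   for m in multisets(rest, len(rest), K-1):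
          (fun g m => g ++ [PySem.List.pyGetD el i 0 :: m]) --     generated.append([elements[i]] + m)
          generated) []                                     -- elements[i]: pyGetD, in range under Pre_

def multisets (elements : List Int) (N : Int) (K : Int) : List (List Int) :=
  multisetsCore K.toNat elements N

-- ===== PORT B =====
def multisets_alt (elements : List Int) (N : Int) (K : Int) : List (List Int) :=
  if K = 0 ∨ N = 0 then [[]]
  else
    ((PySem.List.pyRange 0 K 1).foldl                       -- for _ in range(K):
      (fun acc _ =>
        if acc.isEmpty then acc                             --   if not acc: break  (an empty acc stays
        else acc.flatMap (fun p =>                          --    empty, so skipping = breaking)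
          (PySem.List.pyRange p.1 N 1).map                  --   acc = [(j, part + [elements[j]])
            (fun j => (j, p.2 ++ [PySem.List.pyGetD elements j 0]))))  -- for (i, part) in acc for j in range(i, N)]
      [((0 : Int), ([] : List Int))]).map Prod.snd          -- return [part for (_, part) in acc]

-- ===== PRECONDITION & SPEC =====
-- Pre_ excludes negative K with N ≠ 0 (outside the natural domain: there A recurses forever when N > 0
-- and returns an accidental [] when N < 0), and N > len(elements) with K ≠ 0, N ≠ 0 (A raises IndexError).
def Pre_multisets (elements : List Int) (N : Int) (K : Int) : Prop :=
  K = 0 ∨ N = 0 ∨ (0 < K ∧ N ≤ (elements.length : Int))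
instance (elements : List Int) (N : Int) (K : Int) : Decidable (Pre_multisets elements N K) := by
  unfold Pre_multisets; infer_instance

def pvWitness_multisets : List Int × Int × Int := ([1, 2, 3], 3, 2)

def Spec_multisets (elements : List Int) (N : Int) (K : Int) (out : List (List Int)) : Prop := out = multisets_alt elements N K
instance (elements : List Int) (N : Int) (K : Int) (out : List (List Int)) : Decidable (Spec_multisets elements N K out) := by unfold Spec_multisets; infer_instance

-- ===== CLAIM (what is proved, stated in full; the proofs are below) =====
def Claim_equal_multisets : Prop := ∀ (elements : List Int) (N : Int) (K : Int), Dom_multisets elements N K → Pre_multisets elements N K → Spec_multisets elements N K (multisets elements N K)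

-- ===== LEMMAS AND PROOFS =====

-- abstract form of A's recursion on the truncated list
def fA : List Int → Nat → List (List Int)
  | _, 0 => [[]]
  | el, Nat.succ k =>
    if el.length = 0 then [[]]
    else (List.range el.length).flatMap (fun i => (fA (el.drop i) k).map (fun m => el.getD i 0 :: m))

-- one layer of B's expansion, and its k-fold iteration
def bstep (elements : List Int) (N : Int) (acc : List (Int × List Int)) : List (Int × List Int) :=
  acc.flatMap (fun p => (PySem.List.pyRange p.1 N 1).map (fun j => (j, p.2 ++ [PySem.List.pyGetD elements j 0])))

def biter (elements : List Int) (N : Int) : Nat → List (Int × List Int) → List (Int × List Int)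
  | 0, acc => acc
  | Nat.succ k, acc => biter elements N k (bstep elements N acc)

theorem bridgeA : ∀ (k : Nat) (elements : List Int) (N : Int), 0 < N → N ≤ (elements.length : Int) →
    multisetsCore k elements N = fA (elements.take N.toNat) k := by
  intro k
  induction k with
  | zero => intro elements N _ _; rfl
  | succ k ih =>
    intro elements N hN hlen
    have hNne : N ≠ 0 := by omega
    have hel : (List.take N.toNat elements).length = N.toNat := by
      rw [List.length_take]; omega
    simp only [multisetsCore, if_neg hNne, PySem.List.slice_to _ hN.le,
      PySem.List.foldl_append_singleton_eq_map, PySem.List.foldl_append_eq_flatMap,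
      List.nil_append]
    rw [PySem.List.pyRange_one 0 N]
    simp only [List.flatMap_map, fA, hel, sub_zero]
    rw [if_neg (by omega)]
    apply List.flatMap_congr
    intro i hi
    have hi' : i < N.toNat := List.mem_range.mp hi
    simp only [zero_add, PySem.List.slice_from_natCast, PySem.List.pyGetD_natCast]
    have hdl : (List.drop i (List.take N.toNat elements)).length = N.toNat - i := by
      simp [List.length_drop, hel]
    rw [ih _ _ (by omega : (0:Int) < ((List.drop i (List.take N.toNat elements)).length : Int)) le_rfl]
    rw [Int.toNat_natCast, List.take_length]

theorem foldl_const_biter (elements : List Int) (N : Int) (l : List Int) (init : List (Int × List Int)) :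
    l.foldl (fun acc _ =>
        if acc.isEmpty then acc
        else acc.flatMap (fun p =>
          (PySem.List.pyRange p.1 N 1).map (fun j => (j, p.2 ++ [PySem.List.pyGetD elements j 0])))) init
      = biter elements N l.length init := by
  have hstep : ∀ acc : List (Int × List Int),
      (if acc.isEmpty then acc
       else acc.flatMap (fun p =>
         (PySem.List.pyRange p.1 N 1).map (fun j => (j, p.2 ++ [PySem.List.pyGetD elements j 0]))))
      = bstep elements N acc := by
    intro acc; cases acc <;> simp [bstep]
  induction l generalizing init with
  | nil => rfl
  | cons x xs ih =>
    simp only [List.foldl_cons, hstep] at ih ⊢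
    rw [ih (bstep elements N init)]
    rfl

theorem biter_append (elements : List Int) (N : Int) (k : Nat) (a b : List (Int × List Int)) :
    biter elements N k (a ++ b) = biter elements N k a ++ biter elements N k b := by
  induction k generalizing a b with
  | zero => rfl
  | succ k ih => simp [biter, bstep, List.flatMap_append, ih]

theorem biter_nil (elements : List Int) (N : Int) (k : Nat) : biter elements N k [] = [] := by
  induction k with
  | zero => rfl
  | succ k ih => simp [biter, bstep, ih]

theorem biter_flatMap (elements : List Int) (N : Int) (k : Nat) {α : Type} (l : List α) (h : α → List (Int × List Int)) :
    biter elements N k (l.flatMap h) = l.flatMap (fun x => biter elements N k (h x)) := by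
  induction l with
  | nil => simp [biter_nil]
  | cons x xs ih => simp [List.flatMap_cons, biter_append, ih]

theorem biter_map_prefix (elements : List Int) (N : Int) (k : Nat) (p : List Int) (acc : List (Int × List Int)) :
    biter elements N k (acc.map (fun q => (q.1, p ++ q.2))) =
      (biter elements N k acc).map (fun q => (q.1, p ++ q.2)) := by
  induction k generalizing acc with
  | zero => rfl
  | succ k ih =>
    simp only [biter]
    rw [← ih]
    congr 1
    simp only [bstep, List.map_flatMap, List.flatMap_map]
    congr 1
    funext a
    simp [List.map_map, Function.comp, List.append_assoc]

theorem main_lemma (elements : List Int) (N : Int) (hN : 0 < N) (hlen : N ≤ (elements.length : Int)) :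
    ∀ (k : Nat) (i : Nat), i < N.toNat →
      (biter elements N k [((i : Int), [])]).map Prod.snd = fA ((elements.take N.toNat).drop i) k := by
  intro k
  induction k with
  | zero => intro i hi; rfl
  | succ k ih =>
    intro i hi
    have hel : (List.take N.toNat elements).length = N.toNat := by
      rw [List.length_take]; omega
    have hdl : ((List.take N.toNat elements).drop i).length = N.toNat - i := by
      simp [List.length_drop, hel]
    have hb : bstep elements N [((i : Int), [])] =
        (List.range (N.toNat - i)).flatMap
          (fun t => [(((i + t : Nat) : Int), [PySem.List.pyGetD elements ((i + t : Nat) : Int) 0])]) := by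
      simp only [bstep, List.flatMap_cons, List.flatMap_nil, List.append_nil, List.nil_append]
      rw [PySem.List.pyRange_one]
      have hNt : ((N : Int) - i).toNat = N.toNat - i := by omega
      rw [hNt, List.map_eq_flatMap, List.flatMap_map]
      apply List.flatMap_congr
      intro t _
      simp
    simp only [biter, hb, biter_flatMap, List.map_flatMap]
    rw [fA]
    rw [if_neg (by omega)]
    rw [hdl]
    apply List.flatMap_congr
    intro t ht
    have ht' : t < N.toNat - i := List.mem_range.mp ht
    have key : ([(((i + t : Nat) : Int), [PySem.List.pyGetD elements ((i + t : Nat) : Int) 0])] :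
        List (Int × List Int)) =
        [(((i + t : Nat) : Int), ([] : List Int))].map
          (fun q => (q.1, [PySem.List.pyGetD elements ((i + t : Nat) : Int) 0] ++ q.2)) := by
      simp
    rw [key, biter_map_prefix, List.map_map]
    have hsnd : (Prod.snd ∘ fun q : Int × List Int =>
        (q.1, [PySem.List.pyGetD elements ((i + t : Nat) : Int) 0] ++ q.2)) =
        (fun q : Int × List Int => PySem.List.pyGetD elements ((i + t : Nat) : Int) 0 :: q.2) := by
      funext q; rfl
    rw [hsnd]
    have : (List.map (fun q : Int × List Int => PySem.List.pyGetD elements ((i + t : Nat) : Int) 0 :: q.2)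
        (biter elements N k [(((i + t : Nat) : Int), [])])) =
        (List.map Prod.snd (biter elements N k [(((i + t : Nat) : Int), [])])).map
          (fun m => PySem.List.pyGetD elements ((i + t : Nat) : Int) 0 :: m) := by
      simp [List.map_map]
    rw [this, ih (i + t) (by omega)]
    have h1 : i + t < N.toNat := by omega
    have h2 : N.toNat ≤ elements.length := by omega
    have hdd : List.drop t (List.drop i (List.take N.toNat elements)) =
        List.drop (i + t) (List.take N.toNat elements) := by
      rw [List.drop_drop]
    have hgd : (List.drop i (List.take N.toNat elements)).getD t 0 =
        PySem.List.pyGetD elements ((i + t : Nat) : Int) 0 := by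
      rw [PySem.List.pyGetD_natCast]
      rw [List.getD_eq_getElem _ _ (by rw [hdl]; omega),
          List.getD_eq_getElem _ _ (by omega)]
      simp [List.getElem_drop, List.getElem_take]
    rw [hdd, hgd]

-- ===== VERDICT (by name: the statement is the Claim_ definition above) =====
theorem multisets_spec : Claim_equal_multisets := by
  unfold Claim_equal_multisets
  intro elements N K _ hpre
  unfold Spec_multisets multisets multisets_alt
  by_cases hN0 : N = 0
  · subst hN0
    rw [if_pos (Or.inr rfl)]
    cases h : K.toNat with
    | zero => rfl
    | succ k => simp [multisetsCore]
  by_cases hK0 : K = 0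
  · subst hK0
    rw [if_pos (Or.inl rfl)]
    rfl
  have hrest : 0 < K ∧ N ≤ (elements.length : Int) := by
    rcases hpre with h | h | h
    · exact absurd h hK0
    · exact absurd h hN0
    · exact h
  obtain ⟨hK, hlen⟩ := hrest
  obtain ⟨k, hk⟩ : ∃ k, K.toNat = k + 1 := ⟨K.toNat - 1, by omega⟩
  rw [if_neg (by tauto)]
  rw [foldl_const_biter, PySem.List.length_pyRange_one, sub_zero]
  by_cases hNpos : 0 < N
  · rw [bridgeA K.toNat elements N hNpos hlen]
    have := main_lemma elements N hNpos hlen K.toNat 0 (by omega)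
    simpa using this.symm
  · -- N < 0: A's range(N) is empty, B's first layer empties acc; both return []
    have hNneg : N < 0 := by omega
    rw [hk]
    simp only [multisetsCore, if_neg hN0, biter,
      PySem.List.pyRange_one_eq_nil (by omega : N ≤ (0:Int))]
    simp [bstep, PySem.List.pyRange_one_eq_nil (by omega : N ≤ (0:Int)), biter_nil, List.foldl_nil]
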